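-- pv_equiv track=rewrite | github.com/DHRUV6029/Google-Msft_InterviewQues | .idx/Other_Companies/roomba_bots_amazon.py | solution
-- ===== SOURCE A (Python) =====
-- def solution(x, y):
--     n = len(x)
--
--     maxX = {}
--     maxY = {}
--     minX = {}
--     minY = {}
--
--     for i in range(n):
--         if x[i] > maxX.get(y[i], float('-inf')):
--             maxX[y[i]] = x[i]
--         if x[i] < minX.get(y[i], float('inf')):
--             minX[y[i]] = x[i]
--         if y[i] > maxY.get(x[i], float('-inf')):
--             maxY[x[i]] = y[i]
--         if y[i] < minY.get(x[i], float('inf')):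
--             minY[x[i]] = y[i]
--
--     result = 0
--
--     for i in range(n):
--         if (
--             x[i] != maxX.get(y[i])
--             and x[i] != minX.get(y[i])
--             and y[i] != maxY.get(x[i])
--             and y[i] != minY.get(x[i])
--         ):
--             result += 1
--
--     return result
-- ===== SOURCE B (Python) =====
-- def solution(x, y):
--     pts = list(zip(x, y))
--     return sum(
--         1
--         for px, py in pts
--         if any(qx > px for qx, qy in pts if qy == py)
--         and any(qx < px for qx, qy in pts if qy == py)
--         and any(qy > py for qx, qy in pts if qx == px)
--         and any(qy < py for qx, qy in pts if qx == px)
--     )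
-- ===== Notes on version B (the rewrite author's own statement) =====
-- stated objective: alternative
-- what changed: Removes A's four per-key min/max dictionaries entirely: B counts a point iff some other point lies strictly left, right, below and above it in its row/column, via direct existence scans (any) over the point list; O(n^2) brute force instead of hashed per-group extrema.
import Mathlib
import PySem

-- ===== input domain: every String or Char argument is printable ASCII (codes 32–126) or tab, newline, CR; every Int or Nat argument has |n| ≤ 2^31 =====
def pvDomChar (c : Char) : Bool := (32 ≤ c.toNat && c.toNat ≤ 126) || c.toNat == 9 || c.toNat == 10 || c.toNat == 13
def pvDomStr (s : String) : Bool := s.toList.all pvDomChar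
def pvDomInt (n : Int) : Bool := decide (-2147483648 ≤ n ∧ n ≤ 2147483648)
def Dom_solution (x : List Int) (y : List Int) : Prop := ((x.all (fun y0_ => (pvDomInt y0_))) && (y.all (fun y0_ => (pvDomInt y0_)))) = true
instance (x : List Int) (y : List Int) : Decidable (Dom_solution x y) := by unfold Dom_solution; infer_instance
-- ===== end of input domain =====

-- B drops A's four per-key min/max dictionaries and instead counts a point iff some point lies strictly left, right, below and above it (brute-force existence scans); alternative algorithm, O(n^2) vs A's O(n).


-- ===== PORT A =====
-- `if x[i] > d.get(k, float('-inf')): d[k] = x[i]` — absent key compares as -inf, so always true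
def stepMax (d : PySem.Dict Int Int) (k v : Int) : PySem.Dict Int Int :=
  if (match d.get? k with | some w => decide (w < v) | none => true) then d.insert k v else d

-- `if x[i] < d.get(k, float('inf')): d[k] = x[i]`
def stepMin (d : PySem.Dict Int Int) (k v : Int) : PySem.Dict Int Int :=
  if (match d.get? k with | some w => decide (v < w) | none => true) then d.insert k v else d

-- one iteration of A's first loop (the four dict updates, in A's order) and of A's counting loop
def bodyA (s : PySem.Dict Int Int × PySem.Dict Int Int × PySem.Dict Int Int × PySem.Dict Int Int)
    (xi yi : Int) : PySem.Dict Int Int × PySem.Dict Int Int × PySem.Dict Int Int × PySem.Dict Int Int :=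
  (stepMax s.1 yi xi, stepMax s.2.1 xi yi, stepMin s.2.2.1 yi xi, stepMin s.2.2.2 xi yi)

def countA (ds : PySem.Dict Int Int × PySem.Dict Int Int × PySem.Dict Int Int × PySem.Dict Int Int)
    (r : Int) (xi yi : Int) : Int :=
  if ds.1.get? yi ≠ some xi ∧ ds.2.2.1.get? yi ≠ some xi ∧
     ds.2.1.get? xi ≠ some yi ∧ ds.2.2.2.get? xi ≠ some yi then r + 1 else r

def solution (x : List Int) (y : List Int) : Int :=
  let n := x.length
  -- first loop: build (maxX, maxY, minX, minY)
  let ds := (List.range n).foldl (fun s i => bodyA s (x.getD i 0) (y.getD i 0))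
    (PySem.Dict.empty, PySem.Dict.empty, PySem.Dict.empty, PySem.Dict.empty)
  -- second loop: count points whose coordinate differs from all four extremal lookups
  (List.range n).foldl (fun r i => countA ds r (x.getD i 0) (y.getD i 0)) 0

-- ===== PORT B =====
-- B's test for one point: some point strictly right / left in its row, and strictly above / below in its column
def pvInterior (pts : List (Int × Int)) (p : Int × Int) : Bool :=
  (pts.any (fun q => q.2 == p.2 && p.1 < q.1)) &&
  (pts.any (fun q => q.2 == p.2 && q.1 < p.1)) &&
  (pts.any (fun q => q.1 == p.1 && p.2 < q.2)) &&
  (pts.any (fun q => q.1 == p.1 && q.2 < p.2))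

def solution_alt (x : List Int) (y : List Int) : Int :=
  let pts := x.zip y
  ((pts.filter (pvInterior pts)).length : Int)

-- ===== PRECONDITION & SPEC =====
-- A indexes y[i] for every i < len(x); it raises IndexError exactly when len(y) < len(x).
def Pre_solution (x : List Int) (y : List Int) : Prop := x.length ≤ y.length
instance (x : List Int) (y : List Int) : Decidable (Pre_solution x y) := by unfold Pre_solution; infer_instance
def pvWitness_solution : List Int × List Int := ([1, 2, 3, 2], [5, 5, 5, 7])

def Spec_solution (x : List Int) (y : List Int) (out : Int) : Prop := out = solution_alt x y
instance (x : List Int) (y : List Int) (out : Int) : Decidable (Spec_solution x y out) := by unfold Spec_solution; infer_instance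

-- ===== CLAIM (what is proved, stated in full; the proofs are below) =====
def Claim_equal_solution : Prop := ∀ (x : List Int) (y : List Int), Dom_solution x y → Pre_solution x y → Spec_solution x y (solution x y)

-- ===== LEMMAS AND PROOFS =====

-- the x-values of the points in row k / the y-values of the points in column k
def rowOf (pts : List (Int × Int)) (k : Int) : List Int := (pts.filter (fun p => p.2 == k)).map Prod.fst
def colOf (pts : List (Int × Int)) (k : Int) : List Int := (pts.filter (fun p => p.1 == k)).map Prod.snd

-- an index loop reading x[i], y[i] for i < len(x) is a fold over zip (when len(x) ≤ len(y))
theorem foldl_range_eq_zip {σ : Type} (f : σ → Int → Int → σ) :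
    ∀ (x y : List Int) (init : σ), x.length ≤ y.length →
    (List.range x.length).foldl (fun s i => f s (x.getD i 0) (y.getD i 0)) init
      = (x.zip y).foldl (fun s p => f s p.1 p.2) init := by
  intro x
  induction x with
  | nil => intro y init _; simp
  | cons a x ih =>
    intro y init h
    cases y with
    | nil => simp at h
    | cons b y =>
      simp only [List.length_cons, List.range_succ_eq_map, List.foldl_cons, List.foldl_map,
        List.getD_cons_zero, List.getD_cons_succ, List.zip_cons_cons]
      exact ih y (f init a b) (by simpa using h)

-- option-valued running max/min: one step of A's streaming update, seen on the lookup of one key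
def omax (o : Option Int) (a : Int) : Option Int := some (o.elim a (fun w => max w a))
def omin (o : Option Int) (a : Int) : Option Int := some (o.elim a (fun w => min w a))

theorem get?_foldl_stepMax (kf vf : Int × Int → Int) (k : Int) :
    ∀ (pts : List (Int × Int)) (d : PySem.Dict Int Int),
    (pts.foldl (fun d p => stepMax d (kf p) (vf p)) d).get? k
      = ((pts.filter (fun p => kf p == k)).map vf).foldl omax (d.get? k) := by
  intro pts
  induction pts with
  | nil => intro d; simp
  | cons p t ih =>
    intro d
    simp only [List.foldl_cons, List.filter_cons]
    by_cases hk : kf p = k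
    · subst hk
      have h1 : (stepMax d (kf p) (vf p)).get? (kf p) = omax (d.get? (kf p)) (vf p) := by
        unfold stepMax
        cases hd : d.get? (kf p) with
        | none => simp [PySem.Dict.get?_insert_self, omax]
        | some w =>
          by_cases hw : w < vf p
          · simp [hw, PySem.Dict.get?_insert_self, omax, max_eq_right (le_of_lt hw)]
          · simp [hd, hw, omax, max_eq_left (not_lt.mp hw)]
      simp [ih, h1]
    · have h1 : (stepMax d (kf p) (vf p)).get? k = d.get? k := by
        unfold stepMax
        by_cases hc : (match d.get? (kf p) with | some w => decide (w < vf p) | none => true) = true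
        · simp only [if_pos hc]
          exact PySem.Dict.get?_insert_of_ne d _ (fun h => hk h.symm)
        · simp only [if_neg hc]
      simp [hk, ih, h1]

theorem get?_foldl_stepMin (kf vf : Int × Int → Int) (k : Int) :
    ∀ (pts : List (Int × Int)) (d : PySem.Dict Int Int),
    (pts.foldl (fun d p => stepMin d (kf p) (vf p)) d).get? k
      = ((pts.filter (fun p => kf p == k)).map vf).foldl omin (d.get? k) := by
  intro pts
  induction pts with
  | nil => intro d; simp
  | cons p t ih =>
    intro d
    simp only [List.foldl_cons, List.filter_cons]
    by_cases hk : kf p = k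
    · subst hk
      have h1 : (stepMin d (kf p) (vf p)).get? (kf p) = omin (d.get? (kf p)) (vf p) := by
        unfold stepMin
        cases hd : d.get? (kf p) with
        | none => simp [PySem.Dict.get?_insert_self, omin]
        | some w =>
          by_cases hw : vf p < w
          · simp [hw, PySem.Dict.get?_insert_self, omin, min_eq_right (le_of_lt hw)]
          · simp [hd, hw, omin, min_eq_left (not_lt.mp hw)]
      simp [ih, h1]
    · have h1 : (stepMin d (kf p) (vf p)).get? k = d.get? k := by
        unfold stepMin
        by_cases hc : (match d.get? (kf p) with | some w => decide (vf p < w) | none => true) = true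
        · simp only [if_pos hc]
          exact PySem.Dict.get?_insert_of_ne d _ (fun h => hk h.symm)
        · simp only [if_neg hc]
      simp [hk, ih, h1]

theorem foldl_omax_some (t : List Int) : ∀ w, t.foldl omax (some w) = some (t.foldl max w) := by
  induction t with
  | nil => intro w; rfl
  | cons a t ih => intro w; simpa [omax] using ih (max w a)

theorem foldl_omin_some (t : List Int) : ∀ w, t.foldl omin (some w) = some (t.foldl min w) := by
  induction t with
  | nil => intro w; rfl
  | cons a t ih => intro w; simpa [omin] using ih (min w a)

theorem foldl_omax_cons (h : Int) (t : List Int) :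
    (h :: t).foldl omax none = some (t.foldl max h) := by
  simpa [omax] using foldl_omax_some t h

theorem foldl_omin_cons (h : Int) (t : List Int) :
    (h :: t).foldl omin none = some (t.foldl min h) := by
  simpa [omin] using foldl_omin_some t h

theorem foldl_max_mem (t : List Int) : ∀ h, t.foldl max h ∈ h :: t := by
  induction t with
  | nil => intro h; simp
  | cons a t ih =>
    intro h
    have H := ih (max h a)
    simp only [List.foldl_cons]
    rcases List.mem_cons.mp H with he | he
    · rcases max_choice h a with hc | hc <;> rw [he, hc] <;> simp
    · simp [he]

theorem foldl_min_mem (t : List Int) : ∀ h, t.foldl min h ∈ h :: t := by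
  induction t with
  | nil => intro h; simp
  | cons a t ih =>
    intro h
    have H := ih (min h a)
    simp only [List.foldl_cons]
    rcases List.mem_cons.mp H with he | he
    · rcases min_choice h a with hc | hc <;> rw [he, hc] <;> simp
    · simp [he]

theorem mem_le_foldl_max {a rh : Int} {rt : List Int} (h : a ∈ rh :: rt) :
    a ≤ rt.foldl max rh := by
  rcases List.mem_cons.mp h with h | h
  · exact h ▸ (PySem.List.le_foldl_max rt rh).1
  · exact (PySem.List.le_foldl_max rt rh).2 a h

theorem foldl_min_le_mem {a rh : Int} {rt : List Int} (h : a ∈ rh :: rt) :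
    rt.foldl min rh ≤ a := by
  rcases List.mem_cons.mp h with h | h
  · exact h ▸ (PySem.List.foldl_min_le rt rh).1
  · exact (PySem.List.foldl_min_le rt rh).2 a h

-- "a is not the running max of R" ↔ "some element of R is strictly larger", for a ∈ R
theorem ne_max_iff_exists_gt {a : Int} (R : List Int) (ha : a ∈ R) :
    R.foldl omax none ≠ some a ↔ ∃ c ∈ R, a < c := by
  cases R with
  | nil => simp at ha
  | cons rh rt =>
    rw [foldl_omax_cons]
    constructor
    · intro hne
      refine ⟨rt.foldl max rh, foldl_max_mem rt rh, ?_⟩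
      have h1 := mem_le_foldl_max ha
      have h2 : rt.foldl max rh ≠ a := fun h => hne (by rw [h])
      omega
    · rintro ⟨c, hc, hac⟩ he
      have h1 := mem_le_foldl_max hc
      have h2 : rt.foldl max rh = a := Option.some_injective _ he
      omega

theorem ne_min_iff_exists_lt {a : Int} (R : List Int) (ha : a ∈ R) :
    R.foldl omin none ≠ some a ↔ ∃ c ∈ R, c < a := by
  cases R with
  | nil => simp at ha
  | cons rh rt =>
    rw [foldl_omin_cons]
    constructor
    · intro hne
      refine ⟨rt.foldl min rh, foldl_min_mem rt rh, ?_⟩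
      have h1 := foldl_min_le_mem ha
      have h2 : rt.foldl min rh ≠ a := fun h => hne (by rw [h])
      omega
    · rintro ⟨c, hc, hac⟩ he
      have h1 := foldl_min_le_mem hc
      have h2 : rt.foldl min rh = a := Option.some_injective _ he
      omega

theorem foldl_four (pts : List (Int × Int)) :
    ∀ (d1 d2 d3 d4 : PySem.Dict Int Int),
    pts.foldl (fun s p => bodyA s p.1 p.2) (d1, d2, d3, d4)
      = (pts.foldl (fun d p => stepMax d p.2 p.1) d1, pts.foldl (fun d p => stepMax d p.1 p.2) d2,
         pts.foldl (fun d p => stepMin d p.2 p.1) d3, pts.foldl (fun d p => stepMin d p.1 p.2) d4) := by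
  induction pts with
  | nil => intro d1 d2 d3 d4; rfl
  | cons p t ih => intro d1 d2 d3 d4; simp only [List.foldl_cons, bodyA]; exact ih _ _ _ _

-- counting fold = length of filter (as Int)
theorem count_foldl {α : Type} (cond : α → Bool) :
    ∀ (l : List α) (r : Int), l.foldl (fun r p => if cond p then r + 1 else r) r
      = r + ((l.filter cond).length : Int) := by
  intro l
  induction l with
  | nil => intro r; simp
  | cons a t ih =>
    intro r
    by_cases h : cond a = true
    · simp [List.foldl_cons, h, ih]; ring
    · simp [List.foldl_cons, h, ih]

theorem main_eq (x y : List Int) (hpre : x.length ≤ y.length) :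
    solution x y = solution_alt x y := by
  unfold solution solution_alt
  dsimp only
  rw [foldl_range_eq_zip bodyA x y
    (PySem.Dict.empty, PySem.Dict.empty, PySem.Dict.empty, PySem.Dict.empty) hpre]
  rw [foldl_four]
  rw [foldl_range_eq_zip (countA _) x y 0 hpre]
  have hcong : (x.zip y).foldl (fun r p => countA
        ((x.zip y).foldl (fun d p => stepMax d p.2 p.1) PySem.Dict.empty,
         (x.zip y).foldl (fun d p => stepMax d p.1 p.2) PySem.Dict.empty,
         (x.zip y).foldl (fun d p => stepMin d p.2 p.1) PySem.Dict.empty,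
         (x.zip y).foldl (fun d p => stepMin d p.1 p.2) PySem.Dict.empty) r p.1 p.2) 0
      = (x.zip y).foldl (fun r p => if pvInterior (x.zip y) p then r + 1 else r) 0 := by
    apply PySem.List.foldl_congr_mem
    intro acc p hp
    obtain ⟨a, b⟩ := p
    dsimp only [countA]
    rw [get?_foldl_stepMax Prod.snd Prod.fst b (x.zip y) PySem.Dict.empty,
        get?_foldl_stepMax Prod.fst Prod.snd a (x.zip y) PySem.Dict.empty,
        get?_foldl_stepMin Prod.snd Prod.fst b (x.zip y) PySem.Dict.empty,
        get?_foldl_stepMin Prod.fst Prod.snd a (x.zip y) PySem.Dict.empty]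
    have hR : (List.map Prod.fst (List.filter (fun p => Prod.snd p == b) (x.zip y))) = rowOf (x.zip y) b := rfl
    have hC : (List.map Prod.snd (List.filter (fun p => Prod.fst p == a) (x.zip y))) = colOf (x.zip y) a := rfl
    rw [hR, hC]
    simp only [PySem.Dict.get?_empty]
    have ha : a ∈ rowOf (x.zip y) b :=
      List.mem_map.mpr ⟨(a, b), List.mem_filter.mpr ⟨hp, by simp⟩, rfl⟩
    have hb : b ∈ colOf (x.zip y) a :=
      List.mem_map.mpr ⟨(a, b), List.mem_filter.mpr ⟨hp, by simp⟩, rfl⟩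
    refine if_congr ?_ rfl rfl
    rw [ne_max_iff_exists_gt _ ha, ne_min_iff_exists_lt _ ha,
        ne_max_iff_exists_gt _ hb, ne_min_iff_exists_lt _ hb]
    have hrow : ∀ (P : Int → Prop), (∃ c ∈ rowOf (x.zip y) b, P c)
        ↔ ∃ q ∈ x.zip y, q.2 = b ∧ P q.1 := by
      intro P
      constructor
      · rintro ⟨c, hc, hPc⟩
        obtain ⟨q, hq, rfl⟩ := List.mem_map.mp hc
        have := List.mem_filter.mp hq
        exact ⟨q, this.1, by simpa using this.2, hPc⟩
      · rintro ⟨q, hq, hqb, hP⟩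
        exact ⟨q.1, List.mem_map.mpr ⟨q, List.mem_filter.mpr ⟨hq, by simp [hqb]⟩, rfl⟩, hP⟩
    have hcol : ∀ (P : Int → Prop), (∃ c ∈ colOf (x.zip y) a, P c)
        ↔ ∃ q ∈ x.zip y, q.1 = a ∧ P q.2 := by
      intro P
      constructor
      · rintro ⟨c, hc, hPc⟩
        obtain ⟨q, hq, rfl⟩ := List.mem_map.mp hc
        have := List.mem_filter.mp hq
        exact ⟨q, this.1, by simpa using this.2, hPc⟩
      · rintro ⟨q, hq, hqa, hP⟩
        exact ⟨q.2, List.mem_map.mpr ⟨q, List.mem_filter.mpr ⟨hq, by simp [hqa]⟩, rfl⟩, hP⟩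
    rw [hrow, hrow, hcol, hcol]
    simp only [pvInterior, Bool.and_eq_true, List.any_eq_true, beq_iff_eq, decide_eq_true_eq]
    tauto
  rw [hcong, count_foldl]
  simp

-- ===== VERDICT =====
theorem solution_spec : Claim_equal_solution := by
  intro x y _ hpre
  show solution x y = solution_alt x y
  exact main_eq x y hpre
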